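-- pv_equiv track=rewrite | github.com/bencrane/hq-x | app/services/direct_mail_analytics.py | _build_totals
-- ===== SOURCE A (Python) =====
-- _PIECE_STATUS_TO_FUNNEL = {
--     "queued": "queued",
--     "processing": "queued",
--     "created": "queued",
--     "unknown": "queued",
--     "processed": "processed",
--     "ready_for_mail": "processed",
--     "mailed": "processed",
--     "in_transit": "in_transit",
--     "in_local_area": "in_transit",
--     "processed_for_delivery": "in_transit",
--     "delivered": "delivered",
--     "returned": "returned",
--     "failed": "failed",
--     "rejected": "failed",
-- }
--
-- def _build_totals(status_rows: list[tuple]) -> dict[str, int]: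
--     totals = {
--         "pieces": 0,
--         "delivered": 0,
--         "in_transit": 0,
--         "returned": 0,
--         "failed": 0,
--         "test_mode_count": 0,
--     }
--     for status_, pieces, test_mode_count in status_rows:
--         n = int(pieces)
--         totals["pieces"] += n
--         totals["test_mode_count"] += int(test_mode_count or 0)
--         bucket = _PIECE_STATUS_TO_FUNNEL.get(status_)
--         if bucket == "delivered":
--             totals["delivered"] += n
--         elif bucket == "in_transit":
--             totals["in_transit"] += n
--         elif bucket == "returned":
--             totals["returned"] += n
--         elif bucket == "failed":
--             totals["failed"] += n
--     return totals
-- ===== SOURCE B (Python) =====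
-- _PIECE_STATUS_TO_FUNNEL = {
--     "queued": "queued",
--     "processing": "queued",
--     "created": "queued",
--     "unknown": "queued",
--     "processed": "processed",
--     "ready_for_mail": "processed",
--     "mailed": "processed",
--     "in_transit": "in_transit",
--     "in_local_area": "in_transit",
--     "processed_for_delivery": "in_transit",
--     "delivered": "delivered",
--     "returned": "returned",
--     "failed": "failed",
--     "rejected": "failed",
-- }
--
--
-- def _build_totals(status_rows):
--     def bucket_sum(name):
--         return sum(int(p) for s, p, _ in status_rows
--                    if _PIECE_STATUS_TO_FUNNEL.get(s) == name)
--
--     return {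
--         "pieces": sum(int(p) for _, p, _ in status_rows),
--         "delivered": bucket_sum("delivered"),
--         "in_transit": bucket_sum("in_transit"),
--         "returned": bucket_sum("returned"),
--         "failed": bucket_sum("failed"),
--         "test_mode_count": sum(int(t or 0) for _, _, t in status_rows),
--     }
-- ===== Notes on version B (the rewrite author's own statement) =====
-- stated objective: simpler
-- what changed: Replaces the single accumulating loop over a mutable totals dict with independent one-line sums: one total sum, one filtered sum per funnel bucket, and one sum for test_mode_count, assembled directly into the result dict.
import Mathlib
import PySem

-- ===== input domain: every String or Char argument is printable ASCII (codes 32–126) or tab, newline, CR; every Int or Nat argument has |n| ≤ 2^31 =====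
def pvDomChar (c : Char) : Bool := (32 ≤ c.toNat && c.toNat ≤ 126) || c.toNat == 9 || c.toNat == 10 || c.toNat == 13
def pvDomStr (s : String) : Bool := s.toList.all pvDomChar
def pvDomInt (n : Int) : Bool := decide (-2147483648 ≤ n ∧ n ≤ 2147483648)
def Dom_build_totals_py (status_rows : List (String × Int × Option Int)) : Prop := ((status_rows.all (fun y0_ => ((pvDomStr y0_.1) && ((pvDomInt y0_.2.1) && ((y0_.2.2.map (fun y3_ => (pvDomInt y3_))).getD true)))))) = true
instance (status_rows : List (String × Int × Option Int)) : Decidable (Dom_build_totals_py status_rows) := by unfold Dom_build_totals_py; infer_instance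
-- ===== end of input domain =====

-- B replaces A's single accumulating loop over a mutable totals dict by independent
-- one-line sums (total, one filtered sum per funnel bucket, test_mode sum); objective: simpler.

-- shared module constant _PIECE_STATUS_TO_FUNNEL
def pieceStatusToFunnel : PySem.Dict String String := PySem.Dict.ofList
  [("queued", "queued"), ("processing", "queued"), ("created", "queued"), ("unknown", "queued"),
   ("processed", "processed"), ("ready_for_mail", "processed"), ("mailed", "processed"),
   ("in_transit", "in_transit"), ("in_local_area", "in_transit"), ("processed_for_delivery", "in_transit"),
   ("delivered", "delivered"), ("returned", "returned"), ("failed", "failed"), ("rejected", "failed")]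

-- ===== PORT A =====
-- int(pieces) on an int is the identity; `test_mode_count or 0` is getD 0 (None→0, 0→0, k→k).
-- loop body of A (one iteration of the for-loop)
def stepA (totals : PySem.Dict String Int) (row : String × Int × Option Int) : PySem.Dict String Int :=
  let n := row.2.1
  let totals := totals.insert "pieces" (totals.getD "pieces" 0 + n)
  let totals := totals.insert "test_mode_count" (totals.getD "test_mode_count" 0 + row.2.2.getD 0)
  let bucket := pieceStatusToFunnel.get? row.1
  if bucket = some "delivered" then totals.insert "delivered" (totals.getD "delivered" 0 + n)
  else if bucket = some "in_transit" then totals.insert "in_transit" (totals.getD "in_transit" 0 + n)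
  else if bucket = some "returned" then totals.insert "returned" (totals.getD "returned" 0 + n)
  else if bucket = some "failed" then totals.insert "failed" (totals.getD "failed" 0 + n)
  else totals

def build_totals_py (status_rows : List (String × Int × Option Int)) : List (String × Int) :=
  let totals : PySem.Dict String Int := PySem.Dict.ofList
    [("pieces", 0), ("delivered", 0), ("in_transit", 0), ("returned", 0), ("failed", 0), ("test_mode_count", 0)]
  let totals := status_rows.foldl stepA totals
  totals.items

-- ===== PORT B =====
def bucketSum (status_rows : List (String × Int × Option Int)) (name : String) : Int :=
  ((status_rows.filter (fun r => pieceStatusToFunnel.get? r.1 == some name)).map (fun r => r.2.1)).sum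

def build_totals_py_alt (status_rows : List (String × Int × Option Int)) : List (String × Int) :=
  [("pieces", (status_rows.map (fun r => r.2.1)).sum),
   ("delivered", bucketSum status_rows "delivered"),
   ("in_transit", bucketSum status_rows "in_transit"),
   ("returned", bucketSum status_rows "returned"),
   ("failed", bucketSum status_rows "failed"),
   ("test_mode_count", (status_rows.map (fun r => r.2.2.getD 0)).sum)]

-- ===== PRECONDITION & SPEC =====
def Spec_build_totals_py (status_rows : List (String × Int × Option Int)) (out : List (String × Int)) : Prop := out = build_totals_py_alt status_rows
instance (status_rows : List (String × Int × Option Int)) (out : List (String × Int)) : Decidable (Spec_build_totals_py status_rows out) := by unfold Spec_build_totals_py; infer_instance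

-- ===== CLAIM (what is proved, stated in full; the proofs are below) =====
def Claim_equal_build_totals_py : Prop := ∀ (status_rows : List (String × Int × Option Int)), Dom_build_totals_py status_rows → Spec_build_totals_py status_rows (build_totals_py status_rows)

-- ===== LEMMAS AND PROOFS =====

def mkTotals (p d i r f t : Int) : PySem.Dict String Int :=
  PySem.Dict.mk [("pieces", p), ("delivered", d), ("in_transit", i), ("returned", r), ("failed", f), ("test_mode_count", t)]

lemma foldA_mkTotals (rows : List (String × Int × Option Int)) :
    ∀ p d i r f t, rows.foldl stepA (mkTotals p d i r f t)
    = mkTotals (p + (rows.map (fun r => r.2.1)).sum)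
        (d + bucketSum rows "delivered") (i + bucketSum rows "in_transit")
        (r + bucketSum rows "returned") (f + bucketSum rows "failed")
        (t + (rows.map (fun r => r.2.2.getD 0)).sum) := by
  induction rows with
  | nil => intro p d i r f t; simp [bucketSum]
  | cons row rest ih =>
    intro p d i r f t
    have hstep : ∀ p d i r f t, stepA (mkTotals p d i r f t) row
      = mkTotals (p + row.2.1)
          (if pieceStatusToFunnel.get? row.1 = some "delivered" then d + row.2.1 else d)
          (if pieceStatusToFunnel.get? row.1 = some "in_transit" then i + row.2.1 else i)
          (if pieceStatusToFunnel.get? row.1 = some "returned" then r + row.2.1 else r)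
          (if pieceStatusToFunnel.get? row.1 = some "failed" then f + row.2.1 else f)
          (t + row.2.2.getD 0) := by
      intro p d i r f t
      simp only [stepA, mkTotals]
      split_ifs with h1 h2 h3 h4 <;> first | rfl | simp_all
    simp only [List.foldl_cons, hstep, ih]
    have hb : ∀ name : String,
        bucketSum (row :: rest) name
          = (if pieceStatusToFunnel.get? row.1 = some name then row.2.1 else 0) + bucketSum rest name := by
      intro name
      simp only [bucketSum, List.filter_cons]
      by_cases h : pieceStatusToFunnel.get? row.1 = some name <;> simp [h]
    simp only [hb]
    simp only [List.map_cons, List.sum_cons, mkTotals, PySem.Dict.mk.injEq, List.cons.injEq, Prod.mk.injEq, and_true, true_and]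
    refine ⟨by ring, ?_, ?_, ?_, ?_, by ring⟩ <;> (split_ifs <;> ring)

theorem build_totals_py_spec : Claim_equal_build_totals_py := by
  intro rows _
  unfold Spec_build_totals_py build_totals_py build_totals_py_alt
  show (List.foldl stepA (mkTotals 0 0 0 0 0 0) rows).items = _
  rw [foldA_mkTotals rows 0 0 0 0 0 0]
  simp [mkTotals]
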